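-- pv_equiv track=rewrite | github.com/hellosteadman/podrings.org | podrings/seo/helpers.py | capitalise
-- ===== SOURCE A (Python) =====
-- import string
--
-- PUNCTUATION = string.punctuation + '“”'
--
-- def capitalise(word):
--     chars = ''
--     capitalised = False
--
--     for char in word:
--         if capitalised or char in PUNCTUATION:
--             chars += char
--             continue
--
--         chars += char.upper()
--         capitalised = True
--
--     return chars
-- ===== SOURCE B (Python) =====
-- import string
--
-- PUNCTUATION = string.punctuation + '“”'
--
-- def capitalise(word):
--     for i, char in enumerate(word):
--         if char not in PUNCTUATION:
--             return word[:i] + char.upper() + word[i + 1:]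
--     return word
-- ===== Notes on version B (the rewrite author's own statement) =====
-- stated objective: simpler
-- what changed: B drops A's character-by-character accumulator string and boolean flag: it locates the first non-punctuation character with enumerate, uppercases just that one and rebuilds by slicing, returning the input unchanged if none exists.
import Mathlib
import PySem

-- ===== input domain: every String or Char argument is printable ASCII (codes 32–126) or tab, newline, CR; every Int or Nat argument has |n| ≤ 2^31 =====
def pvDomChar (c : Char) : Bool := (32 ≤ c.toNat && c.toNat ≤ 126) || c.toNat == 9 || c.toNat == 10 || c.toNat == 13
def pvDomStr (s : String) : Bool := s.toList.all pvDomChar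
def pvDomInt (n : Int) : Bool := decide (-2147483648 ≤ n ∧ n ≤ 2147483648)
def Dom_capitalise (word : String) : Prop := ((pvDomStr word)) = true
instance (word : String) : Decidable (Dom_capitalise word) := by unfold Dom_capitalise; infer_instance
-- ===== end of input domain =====

-- B locates the first non-punctuation character by index and rebuilds via slicing,
-- replacing A's per-character accumulator string and boolean flag (objective: simpler).


-- ===== PORT A =====
-- PUNCTUATION = string.punctuation + '“”'
def PUNCTUATION : List Char := "!\"#$%&'()*+,-./:;<=>?@[\\]^_`{|}~“”".toList

-- the for-loop of A: state is (chars, capitalised)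
def capGoA : List Char → List Char → Bool → List Char
  | [], chars, _ => chars
  | c :: rest, chars, cap =>
    if cap || decide (c ∈ PUNCTUATION) then capGoA rest (chars ++ [c]) cap
    else capGoA rest (chars ++ [PySem.Chars.upperChar c]) true

def capitalise (word : String) : String :=
  String.ofList (capGoA word.toList [] false)

-- ===== PORT B =====
-- the for-loop of B over enumerate(word): on the first non-punctuation char at
-- index i, return word[:i] + char.upper() + word[i+1:]; exhausted → word itself
def capGoB (cs : List Char) : List (Char × Nat) → List Char
  | [] => cs
  | (c, i) :: rest =>
    if decide (c ∈ PUNCTUATION) then capGoB cs rest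
    else PySem.List.slice cs none (some (i : Int)) ++ [PySem.Chars.upperChar c]
           ++ PySem.List.slice cs (some ((i : Int) + 1)) none

def capitalise_alt (word : String) : String :=
  String.ofList (capGoB word.toList word.toList.zipIdx)

-- ===== PRECONDITION & SPEC =====
def Spec_capitalise (word : String) (out : String) : Prop := out = capitalise_alt word
instance (word : String) (out : String) : Decidable (Spec_capitalise word out) := by unfold Spec_capitalise; infer_instance

-- ===== CLAIM (what is proved, stated in full; the proofs are below) =====
def Claim_equal_capitalise : Prop := ∀ (word : String), Dom_capitalise word → Spec_capitalise word (capitalise word)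

-- ===== LEMMAS AND PROOFS =====

-- reference form: uppercase the first non-punctuation character
def cap1 : List Char → List Char
  | [] => []
  | c :: rest =>
    if c ∈ PUNCTUATION then c :: cap1 rest else PySem.Chars.upperChar c :: rest

lemma capGoA_true (cs chars : List Char) : capGoA cs chars true = chars ++ cs := by
  induction cs generalizing chars with
  | nil => simp [capGoA]
  | cons c rest ih => simp [capGoA, ih]

lemma capGoA_acc (cs chars : List Char) :
    capGoA cs chars false = chars ++ capGoA cs [] false := by
  induction cs generalizing chars with
  | nil => simp [capGoA]
  | cons c rest ih =>
    by_cases h : c ∈ PUNCTUATION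
    · simp only [capGoA, h, decide_true, Bool.false_or, if_true]
      rw [ih ([] ++ [c]), ih (chars ++ [c])]; simp
    · simp [capGoA, h, capGoA_true]

lemma capGoA_eq_cap1 (cs : List Char) : capGoA cs [] false = cap1 cs := by
  induction cs with
  | nil => rfl
  | cons c rest ih =>
    by_cases h : c ∈ PUNCTUATION
    · simp only [capGoA, h, decide_true, Bool.false_or, if_true, cap1]
      rw [capGoA_acc]; simp [ih]
    · simp [capGoA, cap1, h, capGoA_true]

lemma capGoB_spec (pre suf : List Char) (hpre : ∀ c ∈ pre, c ∈ PUNCTUATION) :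
    capGoB (pre ++ suf) (suf.zipIdx pre.length) = pre ++ cap1 suf := by
  induction suf generalizing pre with
  | nil => simp [capGoB, cap1]
  | cons c rest ih =>
    rw [List.zipIdx_cons]
    by_cases h : c ∈ PUNCTUATION
    · simp only [capGoB, h, decide_true, if_true]
      have h2 : ∀ x ∈ pre ++ [c], x ∈ PUNCTUATION := by
        intro x hx
        rcases List.mem_append.1 hx with hx | hx
        · exact hpre x hx
        · simp at hx; subst hx; exact h
      have := ih (pre ++ [c]) h2
      simpa [cap1, h] using this
    · simp only [capGoB, h, decide_false, if_false, cap1]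
      rw [PySem.List.slice_to_natCast]
      have : ((pre.length : Int) + 1) = ((pre.length + 1 : Nat) : Int) := by push_cast; ring
      rw [this, PySem.List.slice_from_natCast]
      simp [List.drop_append]

lemma capGoB_eq_cap1 (cs : List Char) : capGoB cs cs.zipIdx = cap1 cs := by
  have := capGoB_spec [] cs (by simp)
  simpa using this

-- ===== VERDICT (by name: the statement is the Claim_ definition above) =====
theorem capitalise_spec : Claim_equal_capitalise := by
  intro word _
  unfold Spec_capitalise capitalise capitalise_alt
  rw [capGoA_eq_cap1, capGoB_eq_cap1]
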